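-- pv_equiv track=rewrite | github.com/joaquinromeroing/resolucion-ejercicio-python | procesar_compras.py | verificar_ordenado
-- ===== SOURCE A (Python) =====
-- def verificar_ordenado(filas):
--     if len(filas) <= 1:
--         return True
--
--     i = 0
--     while i < len(filas) - 1:
--         if filas[i]["PRSUC"].strip().upper() > filas[i + 1]["PRSUC"].strip().upper():
--             return False
--         i += 1
--
--     return True
-- ===== SOURCE B (Python) =====
-- def verificar_ordenado(filas):
--     claves = [f["PRSUC"].strip().upper() for f in filas]
--     return claves == sorted(claves)
-- ===== Notes on version B (the rewrite author's own statement) =====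
-- stated objective: idiomatic
-- what changed: Replaces the index-based while-loop over adjacent pairs with building the normalized key list once and comparing it to its sorted copy (keys == sorted(keys)).
-- outside the precondition, e.g. on verificar_ordenado([{}]): A returns True, B raises KeyError; on verificar_ordenado([{'PRSUC': 'b'}, {'PRSUC': 'a'}, {}]): A returns False, B raises KeyError
import Mathlib
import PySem

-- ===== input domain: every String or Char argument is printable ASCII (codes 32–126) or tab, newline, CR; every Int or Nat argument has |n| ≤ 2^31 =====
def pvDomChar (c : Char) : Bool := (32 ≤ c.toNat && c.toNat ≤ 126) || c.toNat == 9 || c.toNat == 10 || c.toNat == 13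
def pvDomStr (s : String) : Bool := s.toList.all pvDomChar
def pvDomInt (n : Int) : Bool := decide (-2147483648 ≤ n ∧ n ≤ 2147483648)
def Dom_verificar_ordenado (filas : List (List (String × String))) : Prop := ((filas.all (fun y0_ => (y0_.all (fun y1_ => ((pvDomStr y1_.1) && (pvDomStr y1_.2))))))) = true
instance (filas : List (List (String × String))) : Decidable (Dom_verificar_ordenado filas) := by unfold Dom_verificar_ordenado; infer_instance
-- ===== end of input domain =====

-- B replaces A's index-based while-loop over adjacent pairs by building the normalized key
-- list once and comparing it to its sorted copy (idiomatic; same return value on Pre_).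

-- ===== PORT A =====
-- f["PRSUC"].strip().upper() ; the dict lookup is first-match (PySem.Dict); the .getD ""
-- default is only reached outside Pre_ (Python raises KeyError there).
def pvPrsucKey (row : List (String × String)) : String :=
  PySem.Str.upper (PySem.Str.strip (((PySem.Dict.mk row).get? "PRSUC").getD ""))

-- the 'while i < len(filas) - 1' loop of A
def pvLoopA (filas : List (List (String × String))) (i : Nat) : Bool :=
  if h : i < filas.length - 1 then
    if pvPrsucKey ((filas[i]?).getD []) > pvPrsucKey ((filas[i+1]?).getD []) then
      false
    else
      pvLoopA filas (i+1)
  else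
    true
termination_by filas.length - 1 - i
decreasing_by omega

def verificar_ordenado (filas : List (List (String × String))) : Bool :=
  if filas.length ≤ 1 then true
  else pvLoopA filas 0

-- ===== PORT B =====
def verificar_ordenado_alt (filas : List (List (String × String))) : Bool :=
  let claves := filas.map pvPrsucKey
  claves == PySem.List.sorted claves (fun x => x) false

-- ===== PRECONDITION & SPEC =====
-- Pre_ excludes rows lacking a "PRSUC" key: Python A raises KeyError on them when it reaches
-- them (and B always does), while A still returns a value when such a row is never compared
-- (a list of length ≤ 1, or an out-of-order pair found earlier) — those inputs are cited.
def Pre_verificar_ordenado (filas : List (List (String × String))) : Prop :=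
  ∀ row ∈ filas, ∃ p ∈ row, p.1 = "PRSUC"
instance (filas : List (List (String × String))) : Decidable (Pre_verificar_ordenado filas) := by unfold Pre_verificar_ordenado; infer_instance

def pvWitness_verificar_ordenado : (List (List (String × String))) :=
  [[("PRSUC", " a ")], [("PRSUC", "B")]]

def Spec_verificar_ordenado (filas : List (List (String × String))) (out : Bool) : Prop := out = verificar_ordenado_alt filas
instance (filas : List (List (String × String))) (out : Bool) : Decidable (Spec_verificar_ordenado filas out) := by unfold Spec_verificar_ordenado; infer_instance

-- ===== CLAIM (what is proved, stated in full; the proofs are below) =====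
def Claim_equal_verificar_ordenado : Prop := ∀ (filas : List (List (String × String))), Dom_verificar_ordenado filas → Pre_verificar_ordenado filas → Spec_verificar_ordenado filas (verificar_ordenado filas)

-- ===== LEMMAS AND PROOFS =====

-- A's loop from index i decides chain-sortedness of the keys from index i on
lemma pvLoopA_eq_chain (filas : List (List (String × String))) :
    ∀ k i, filas.length - 1 - i = k →
      pvLoopA filas i = decide (((filas.map pvPrsucKey).drop i).IsChain (· ≤ ·)) := by
  intro k
  induction k with
  | zero =>
    intro i hk
    rw [pvLoopA]
    rw [dif_neg (by omega)]
    rcases hd : (filas.map pvPrsucKey).drop i with _ | ⟨a, t⟩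
    · simp
    · have hlen : t = [] := by
        have := congrArg List.length hd
        simp at this
        have : t.length = 0 := by omega
        simpa [List.length_eq_zero_iff] using this
      subst hlen; simp
  | succ k ih =>
    intro i hk
    have hi : i < filas.length - 1 := by omega
    have hi1 : i + 1 < filas.length := by omega
    have hi0 : i < filas.length := by omega
    rw [pvLoopA, dif_pos hi]
    have e0 : (filas[i]?).getD [] = filas[i] := by
      simp [List.getElem?_eq_getElem hi0]
    have e1 : (filas[i+1]?).getD [] = filas[i+1] := by
      simp [List.getElem?_eq_getElem hi1]
    have hdrop : (filas.map pvPrsucKey).drop i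
        = pvPrsucKey filas[i] :: (filas.map pvPrsucKey).drop (i+1) := by
      rw [List.drop_eq_getElem_cons (by simpa using hi0)]
      simp
    have hdrop1 : (filas.map pvPrsucKey).drop (i+1)
        = pvPrsucKey filas[i+1] :: (filas.map pvPrsucKey).drop (i+2) := by
      rw [List.drop_eq_getElem_cons (by simpa using hi1)]
      simp
    rw [e0, e1, hdrop, hdrop1]
    by_cases hgt : pvPrsucKey filas[i+1] < pvPrsucKey filas[i]
    · rw [if_pos hgt]
      simp only [List.isChain_cons_cons, eq_false (not_le_of_gt hgt), false_and,
        decide_false]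
    · rw [if_neg hgt]
      rw [ih (i+1) (by omega), hdrop1]
      simp only [List.isChain_cons_cons, eq_true (le_of_not_gt hgt), true_and]

-- B decides pairwise sortedness of the key list
lemma alt_eq_pairwise (filas : List (List (String × String))) :
    verificar_ordenado_alt filas
      = decide ((filas.map pvPrsucKey).Pairwise (· ≤ ·)) := by
  unfold verificar_ordenado_alt
  set claves := filas.map pvPrsucKey with hc
  show (claves == PySem.List.sorted claves (fun x => x) false)
      = decide (claves.Pairwise (· ≤ ·))
  by_cases hp : claves.Pairwise (· ≤ ·)
  · have hs : PySem.List.sorted claves (fun x => x) false = claves :=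
      PySem.List.sorted_eq_self_of_pairwise claves (fun x => x) hp
    rw [hs]
    exact (beq_self_eq_true claves).trans (decide_eq_true hp).symm
  · have hne : claves ≠ PySem.List.sorted claves (fun x => x) false := by
      intro he
      exact hp (he ▸ PySem.List.sorted_pairwise claves (fun x => x))
    rw [beq_eq_false_iff_ne.mpr hne]
    exact (decide_eq_false hp).symm

-- ===== VERDICT (by name: the statement is the Claim_ definition above) =====
theorem verificar_ordenado_spec : Claim_equal_verificar_ordenado := by
  intro filas _ _
  unfold Spec_verificar_ordenado
  have hA : verificar_ordenado filas
      = decide ((filas.map pvPrsucKey).IsChain (· ≤ ·)) := by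
    unfold verificar_ordenado
    by_cases hl : filas.length ≤ 1
    · rw [if_pos hl]
      rcases filas with _ | ⟨r, _ | ⟨r2, rs⟩⟩ <;> simp at hl ⊢
    · rw [if_neg hl]
      rw [pvLoopA_eq_chain filas (filas.length - 1 - 0) 0 rfl]
      simp
  rw [alt_eq_pairwise, hA]
  exact decide_eq_decide.mpr List.isChain_iff_pairwise
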